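-- pv_equiv track=rewrite | github.com/pete-kufahl/aoc | 2024/python/day2/safety.py | validate_levels
-- ===== SOURCE A (Python) =====
-- def validate_levels(levels, lo, hi) -> bool:
--     """
--     check differences against range and monotonicity in a single pass through
--     the numbers list (levels)
--     """
--     increasing = None  # determine the direction during the first comparison
--
--     for i in range(1, len(levels)):
--         diff = levels[i] - levels[i - 1]
--
--         # difference versus bounds
--         if abs(diff) < lo or abs(diff) > hi:
--             return False
--
--         # determine/validate monotonicity
--         if increasing is None:
--             if diff != 0:
--                 increasing = diff > 0
--         else:
--             if (increasing and diff < 0) or (not increasing and diff > 0):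
--                 return False
--
--     return True
-- ===== SOURCE B (Python) =====
-- def validate_levels(levels, lo, hi) -> bool:
--     diffs = [b - a for a, b in zip(levels, levels[1:])]
--     if any(abs(d) < lo or abs(d) > hi for d in diffs):
--         return False
--     nonzero = [d for d in diffs if d != 0]
--     return all(d > 0 for d in nonzero) or all(d < 0 for d in nonzero)
-- ===== Notes on version B (the rewrite author's own statement) =====
-- stated objective: simpler
-- what changed: Replaces the stateful single pass carrying an Optional direction flag with a precomputed list of consecutive differences, a bounds check over it, and an all-positive-or-all-negative sign check over its nonzero elements.
import Mathlib
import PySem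

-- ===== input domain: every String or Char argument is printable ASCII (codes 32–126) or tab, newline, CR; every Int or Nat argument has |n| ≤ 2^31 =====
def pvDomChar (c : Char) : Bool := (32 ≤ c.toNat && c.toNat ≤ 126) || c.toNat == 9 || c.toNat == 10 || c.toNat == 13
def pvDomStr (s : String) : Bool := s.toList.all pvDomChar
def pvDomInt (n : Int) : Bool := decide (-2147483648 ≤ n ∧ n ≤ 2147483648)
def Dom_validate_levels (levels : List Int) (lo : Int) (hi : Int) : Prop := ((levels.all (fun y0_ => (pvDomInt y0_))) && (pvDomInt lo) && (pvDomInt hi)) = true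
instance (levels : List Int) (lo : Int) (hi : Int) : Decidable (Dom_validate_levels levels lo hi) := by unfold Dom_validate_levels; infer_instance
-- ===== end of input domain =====

-- ===== PORT A =====
-- B replaces A's stateful pass (Optional direction flag) with a diffs list, a bounds check
-- and a sign-consistency check over the nonzero diffs; objective: simpler.
-- Port of A: for i in range(1, len): single pass over consecutive pairs carrying `increasing`.
def validate_levels_go (lo : Int) (hi : Int) (increasing : Option Bool) : List Int → Bool
  | [] => true
  | [_] => true
  | a :: b :: rest =>
    let diff := b - a
    if |diff| < lo ∨ |diff| > hi then false
    else
      match increasing with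
      | none =>
        if diff ≠ 0 then validate_levels_go lo hi (some (decide (diff > 0))) (b :: rest)
        else validate_levels_go lo hi none (b :: rest)
      | some inc =>
        if (inc ∧ diff < 0) ∨ (¬ (inc = true) ∧ diff > 0) then false
        else validate_levels_go lo hi (some inc) (b :: rest)

def validate_levels (levels : List Int) (lo : Int) (hi : Int) : Bool :=
  validate_levels_go lo hi none levels

-- ===== PORT B =====
def pvDiffs (levels : List Int) : List Int :=
  (levels.zip levels.tail).map (fun p => p.2 - p.1)

def validate_levels_alt (levels : List Int) (lo : Int) (hi : Int) : Bool :=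
  let diffs := pvDiffs levels
  if diffs.any (fun d => decide (|d| < lo) || decide (|d| > hi)) then false
  else
    let nonzero := diffs.filter (fun d => d ≠ 0)
    nonzero.all (fun d => decide (d > 0)) || nonzero.all (fun d => decide (d < 0))

-- ===== PRECONDITION & SPEC =====
def Spec_validate_levels (levels : List Int) (lo : Int) (hi : Int) (out : Bool) : Prop := out = validate_levels_alt levels lo hi
instance (levels : List Int) (lo : Int) (hi : Int) (out : Bool) : Decidable (Spec_validate_levels levels lo hi out) := by unfold Spec_validate_levels; infer_instance

-- ===== CLAIM (what is proved, stated in full; the proofs are below) =====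
def Claim_equal_validate_levels : Prop := ∀ (levels : List Int) (lo : Int) (hi : Int), Dom_validate_levels levels lo hi → Spec_validate_levels levels lo hi (validate_levels levels lo hi)

-- ===== LEMMAS AND PROOFS =====
def pvBoundsOk (lo hi : Int) (ds : List Int) : Bool :=
  ds.all (fun d => !(decide (|d| < lo) || decide (|d| > hi)))

def pvMonoOk (inc : Bool) (ds : List Int) : Bool :=
  ds.all (fun d => !(decide ((inc ∧ d < 0) ∨ (¬ (inc = true) ∧ d > 0))))

def pvAllPos (ds : List Int) : Bool := (ds.filter (fun d => d ≠ 0)).all (fun d => decide (d > 0))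
def pvAllNeg (ds : List Int) : Bool := (ds.filter (fun d => d ≠ 0)).all (fun d => decide (d < 0))

theorem pvDiffs_cons (a b : Int) (r : List Int) :
    pvDiffs (a :: b :: r) = (b - a) :: pvDiffs (b :: r) := by
  simp [pvDiffs]

theorem all_not_any (q : Int → Bool) (l : List Int) :
    l.all (fun d => !(q d)) = !(l.any q) := by
  simp [List.all_eq_not_any_not]

theorem alt_eq (levels : List Int) (lo hi : Int) :
    validate_levels_alt levels lo hi =
      (pvBoundsOk lo hi (pvDiffs levels) &&
        (pvAllPos (pvDiffs levels) || pvAllNeg (pvDiffs levels))) := by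
  unfold validate_levels_alt pvBoundsOk pvAllPos pvAllNeg
  rw [all_not_any]
  cases h : (pvDiffs levels).any (fun d => decide (|d| < lo) || decide (|d| > hi)) <;> simp [h]

theorem boundsOk_cons (lo hi d : Int) (ds : List Int) :
    pvBoundsOk lo hi (d :: ds) =
      (!(decide (|d| < lo) || decide (|d| > hi)) && pvBoundsOk lo hi ds) := by
  simp [pvBoundsOk]

theorem monoOk_cons (inc : Bool) (d : Int) (ds : List Int) :
    pvMonoOk inc (d :: ds) =
      (!(decide ((inc ∧ d < 0) ∨ (¬ (inc = true) ∧ d > 0))) && pvMonoOk inc ds) := by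
  simp [pvMonoOk]

theorem allPos_cons_zero (ds : List Int) : pvAllPos ((0 : Int) :: ds) = pvAllPos ds := by
  simp [pvAllPos]

theorem allNeg_cons_zero (ds : List Int) : pvAllNeg ((0 : Int) :: ds) = pvAllNeg ds := by
  simp [pvAllNeg]

theorem allPos_cons_ne (d : Int) (ds : List Int) (h : d ≠ 0) :
    pvAllPos (d :: ds) = (decide (d > 0) && pvAllPos ds) := by
  simp [pvAllPos, List.filter_cons, h]

theorem allNeg_cons_ne (d : Int) (ds : List Int) (h : d ≠ 0) :
    pvAllNeg (d :: ds) = (decide (d < 0) && pvAllNeg ds) := by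
  simp [pvAllNeg, List.filter_cons, h]

theorem allPos_eq_mono (ds : List Int) : pvAllPos ds = pvMonoOk true ds := by
  induction ds with
  | nil => rfl
  | cons d t ih =>
    rw [monoOk_cons, ← ih]
    by_cases h : d = 0
    · subst h; rw [allPos_cons_zero]; simp
    · rw [allPos_cons_ne d t h]
      congr 1
      by_cases hp : d > 0 <;> simp [hp] <;> omega

theorem allNeg_eq_mono (ds : List Int) : pvAllNeg ds = pvMonoOk false ds := by
  induction ds with
  | nil => rfl
  | cons d t ih =>
    rw [monoOk_cons, ← ih]
    by_cases h : d = 0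
    · subst h; rw [allNeg_cons_zero]; simp
    · rw [allNeg_cons_ne d t h]
      congr 1
      by_cases hn : d < 0 <;> simp [hn] <;> omega

-- the `some inc` loop checks bounds everywhere and that no diff violates direction `inc`
theorem go_some (lo hi : Int) (inc : Bool) : ∀ l : List Int,
    validate_levels_go lo hi (some inc) l =
      (pvBoundsOk lo hi (pvDiffs l) && pvMonoOk inc (pvDiffs l)) := by
  intro l
  induction l with
  | nil => simp [validate_levels_go, pvDiffs, pvBoundsOk, pvMonoOk]
  | cons a t ih =>
    cases t with
    | nil => simp [validate_levels_go, pvDiffs, pvBoundsOk, pvMonoOk]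
    | cons b r =>
      rw [show validate_levels_go lo hi (some inc) (a :: b :: r) =
        (if |b - a| < lo ∨ |b - a| > hi then false
         else if (inc ∧ b - a < 0) ∨ (¬ (inc = true) ∧ b - a > 0) then false
         else validate_levels_go lo hi (some inc) (b :: r)) from rfl]
      rw [pvDiffs_cons, boundsOk_cons, monoOk_cons]
      by_cases hb : |b - a| < lo ∨ |b - a| > hi
      · have e : (decide (|b - a| < lo) || decide (|b - a| > hi)) = true := by
          rcases hb with h | h <;> simp [h]
        rw [if_pos hb, e]
        simp
      · push_neg at hb
        rw [if_neg (by push_neg; exact hb)]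
        have e1 : decide (|b - a| < lo) = false := decide_eq_false (not_lt.mpr hb.1)
        have e2 : decide (|b - a| > hi) = false := decide_eq_false (not_lt.mpr hb.2)
        by_cases hv : (inc ∧ b - a < 0) ∨ (¬ (inc = true) ∧ b - a > 0)
        · rw [if_pos hv, decide_eq_true hv]
          simp
        · rw [if_neg hv, decide_eq_false hv, ih, e1, e2]
          simp

theorem go_none (lo hi : Int) : ∀ l : List Int,
    validate_levels_go lo hi none l = validate_levels_alt l lo hi := by
  intro l
  induction l with
  | nil => simp [validate_levels_go, validate_levels_alt, pvDiffs]
  | cons a t ih =>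
    cases t with
    | nil => simp [validate_levels_go, validate_levels_alt, pvDiffs]
    | cons b r =>
      rw [show validate_levels_go lo hi none (a :: b :: r) =
        (if |b - a| < lo ∨ |b - a| > hi then false
         else if b - a ≠ 0 then validate_levels_go lo hi (some (decide (b - a > 0))) (b :: r)
         else validate_levels_go lo hi none (b :: r)) from rfl]
      rw [alt_eq, pvDiffs_cons, boundsOk_cons]
      by_cases hb : |b - a| < lo ∨ |b - a| > hi
      · have e : (decide (|b - a| < lo) || decide (|b - a| > hi)) = true := by
          rcases hb with h | h <;> simp [h]
        rw [if_pos hb, e]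
        simp
      · push_neg at hb
        rw [if_neg (by push_neg; exact hb)]
        have e1 : decide (|b - a| < lo) = false := decide_eq_false (not_lt.mpr hb.1)
        have e2 : decide (|b - a| > hi) = false := decide_eq_false (not_lt.mpr hb.2)
        rw [e1, e2]
        by_cases hz : b - a = 0
        · rw [if_neg (by simpa using hz), ih, alt_eq, hz, allPos_cons_zero, allNeg_cons_zero]
          simp
        · rw [if_pos hz, go_some, allPos_cons_ne _ _ hz, allNeg_cons_ne _ _ hz]
          by_cases hp : b - a > 0
          · rw [decide_eq_true hp, decide_eq_false (show ¬ b - a < 0 by omega), ← allPos_eq_mono]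
            simp
          · have hn : b - a < 0 := by omega
            rw [decide_eq_true hn, decide_eq_false hp, ← allNeg_eq_mono]
            simp

-- ===== VERDICT (by name: the statement is the Claim_ definition above) =====
theorem validate_levels_spec : Claim_equal_validate_levels := by
  intro levels lo hi _
  unfold Spec_validate_levels validate_levels
  exact go_none lo hi levels
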